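-- pv_equiv track=rewrite | github.com/ericzhang98/competitive | codejam/2020/round1a/a.py | solution
-- ===== SOURCE A (Python) =====
-- def solution(P):
--     prefixes, suffixes, mids = [], [], []
--     for pattern in P:
--         pattern = pattern.split('*')
--         prefix = pattern[0]
--         suffix = pattern[-1]
--         mid = "".join(pattern[1:len(pattern)-1])
--         prefixes.append(prefix)
--         suffixes.append(suffix)
--         mids.append(mid)
--     prefixes.sort(key=len)
--     suffixes.sort(key=len)
--     a = prefixes[-1]
--     for prefix in prefixes:
--         if prefix != a[:len(prefix)]:
--             return "*"
--     b = suffixes[-1]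
--     for suffix in suffixes:
--         if suffix != b[len(b)-len(suffix):]:
--             return "*"
--     return a + "".join(mids) + b
-- ===== SOURCE B (Python) =====
-- def _merge(values, fits):
--     m = values[0]
--     for v in values[1:]:
--         short, long = (v, m) if len(v) <= len(m) else (m, v)
--         if not fits(long, short):
--             return None
--         m = long
--     return m
--
--
-- def solution(P):
--     parts_list = [p.split('*') for p in P]
--     mp = _merge([parts[0] for parts in parts_list], str.startswith)
--     if mp is None:
--         return '*'
--     ms = _merge([parts[-1] for parts in parts_list], str.endswith)
--     if ms is None:
--         return '*'
--     return mp + ''.join(''.join(parts[1:-1]) for parts in parts_list) + ms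
-- ===== Notes on version B (the rewrite author's own statement) =====
-- stated objective: alternative
-- what changed: Instead of sorting prefixes/suffixes by length, taking the longest and re-scanning all of them against it via slicing, B merges prefixes (and suffixes) pairwise in one fold, keeping the longer of each startswith/endswith-compatible pair; no sort and no fixed reference element.
import Mathlib
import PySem

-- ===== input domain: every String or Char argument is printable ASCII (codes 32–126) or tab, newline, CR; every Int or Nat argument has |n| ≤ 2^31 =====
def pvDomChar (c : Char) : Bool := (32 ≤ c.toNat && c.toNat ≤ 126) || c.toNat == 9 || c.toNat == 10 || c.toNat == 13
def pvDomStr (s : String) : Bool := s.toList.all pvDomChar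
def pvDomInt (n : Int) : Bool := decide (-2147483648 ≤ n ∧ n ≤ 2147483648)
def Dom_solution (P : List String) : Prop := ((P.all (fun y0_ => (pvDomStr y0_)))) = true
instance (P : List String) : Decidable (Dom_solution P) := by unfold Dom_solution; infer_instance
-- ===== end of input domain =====

-- B merges prefixes/suffixes pairwise in one fold (keep the longer of each compatible pair) instead of
-- A's sort-by-length + re-scan against the longest; alternative decomposition, equal results proved below.

-- ===== PORT A =====
-- pattern.split('*'): the separator "*" is nonempty so split? never returns none, and its result is a
-- nonempty list, so parts[0] / parts[-1] never raise: the defaulted forms are exact.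
def solution (P : List String) : String :=
  let acc : List String × List String × List String :=
    P.foldl (fun (st : List String × List String × List String) pattern =>
      let parts := (PySem.Str.split? pattern "*").getD []
      let pfx := PySem.List.pyGetD parts 0 ""
      let sfx := PySem.List.pyGetD parts (-1) ""
      let mid := PySem.Str.join "" (PySem.List.slice parts (some 1) (some ((parts.length : Int) - 1)))
      (st.1 ++ [pfx], st.2.1 ++ [sfx], st.2.2 ++ [mid])) ([], [], [])
  let prefixes := PySem.List.sorted acc.1 (fun s => PySem.Str.len s)
  let suffixes := PySem.List.sorted acc.2.1 (fun s => PySem.Str.len s)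
  let a := PySem.List.pyGetD prefixes (-1) ""   -- prefixes[-1]: IndexError on P = [], excluded by Pre_
  if prefixes.all (fun pfx => pfx == PySem.Str.slice a none (some (PySem.Str.len pfx))) then
    let b := PySem.List.pyGetD suffixes (-1) ""
    if suffixes.all (fun sfx => sfx == PySem.Str.slice b (some (PySem.Str.len b - PySem.Str.len sfx)) none) then
      a ++ PySem.Str.join "" acc.2.2 ++ b
    else "*"
  else "*"

-- ===== PORT B =====
-- _merge: the early 'return None' is ported as a fold over an Option accumulator;
-- values[0] raises only on the empty list (excluded by Pre_), so the defaulted head is exact there.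
def merge_alt (values : List String) (fits : String → String → Bool) : Option String :=
  values.tail.foldl (fun acc v =>
    match acc with
    | none => none
    | some m =>
      let sl := if PySem.Str.len v ≤ PySem.Str.len m then (v, m) else (m, v)
      if fits sl.2 sl.1 then some sl.2 else none) (some (values.headD ""))

def solution_alt (P : List String) : String :=
  let partsList := P.map (fun p => (PySem.Str.split? p "*").getD [])
  match merge_alt (partsList.map (fun parts => PySem.List.pyGetD parts 0 "")) PySem.Str.startswith with
  | none => "*"
  | some mp =>
    match merge_alt (partsList.map (fun parts => PySem.List.pyGetD parts (-1) "")) PySem.Str.endswith with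
    | none => "*"
    | some ms =>
      mp ++ PySem.Str.join "" (partsList.map (fun parts =>
        PySem.Str.join "" (PySem.List.slice parts (some 1) (some (-1))))) ++ ms

-- ===== PRECONDITION & SPEC =====
-- Pre_ excludes only the empty list, on which A raises IndexError (prefixes[-1]).
def Pre_solution (P : List String) : Prop := P ≠ []
instance (P : List String) : Decidable (Pre_solution P) := by unfold Pre_solution; infer_instance
def pvWitness_solution : List String := ["a*b", "a*c*b"]

def Spec_solution (P : List String) (out : String) : Prop := out = solution_alt P
instance (P : List String) (out : String) : Decidable (Spec_solution P out) := by unfold Spec_solution; infer_instance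

-- ===== CLAIM (what is proved, stated in full; the proofs are below) =====
def Claim_equal_solution : Prop := ∀ (P : List String), Dom_solution P → Pre_solution P → Spec_solution P (solution P)

-- ===== LEMMAS AND PROOFS =====

/-- prefix / suffix / middle of one pattern, as both ports compute them. -/
def pvPfx (p : String) : String := PySem.List.pyGetD ((PySem.Str.split? p "*").getD []) 0 ""
def pvSfx (p : String) : String := PySem.List.pyGetD ((PySem.Str.split? p "*").getD []) (-1) ""
def pvMidA (p : String) : String :=
  PySem.Str.join "" (PySem.List.slice ((PySem.Str.split? p "*").getD []) (some 1)
    (some ((((PySem.Str.split? p "*").getD []).length : Int) - 1)))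
def pvMidB (p : String) : String :=
  PySem.Str.join "" (PySem.List.slice ((PySem.Str.split? p "*").getD []) (some 1) (some (-1)))

/-- B's fold step, named for the lemmas. -/
def pvStep (fits : String → String → Bool) (acc : Option String) (v : String) : Option String :=
  match acc with
  | none => none
  | some m =>
    let sl := if PySem.Str.len v ≤ PySem.Str.len m then (v, m) else (m, v)
    if fits sl.2 sl.1 then some sl.2 else none

theorem merge_alt_eq (values : List String) (fits : String → String → Bool) :
    merge_alt values fits = values.tail.foldl (pvStep fits) (some (values.headD "")) := rfl

theorem pvSliceMid (xs : List String) :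
    PySem.List.slice xs (some 1) (some ((xs.length : Int) - 1)) =
      PySem.List.slice xs (some 1) (some (-1)) := by
  have h : PySem.List.clampIdx xs.length ((xs.length : Int) - 1) =
      PySem.List.clampIdx xs.length (-1) := by
    unfold PySem.List.clampIdx; split_ifs <;> omega
  simp [PySem.List.slice, h]

theorem pvMidA_eq (p : String) : pvMidA p = pvMidB p := by
  unfold pvMidA pvMidB; rw [pvSliceMid]

theorem pvFold_none (fits : String → String → Bool) (l : List String) :
    l.foldl (pvStep fits) none = none := by
  induction l with
  | nil => rfl
  | cons v t ih => simpa [pvStep] using ih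

theorem pvFold_some (fits : String → String → Bool)
    (hrefl : ∀ x, fits x x = true)
    (htrans : ∀ x y z, fits y x = true → fits z y = true → fits z x = true) :
    ∀ (rest : List String) (m0 m : String),
      rest.foldl (pvStep fits) (some m0) = some m →
      m ∈ m0 :: rest ∧ ∀ x ∈ m0 :: rest, fits m x = true := by
  intro rest
  induction rest with
  | nil =>
    intro m0 m h
    simp only [List.foldl_nil, Option.some.injEq] at h
    subst h
    exact ⟨List.mem_singleton.mpr rfl, by simpa using hrefl _⟩
  | cons v t ih =>
    intro m0 m h
    simp only [List.foldl_cons] at h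
    by_cases hl : PySem.Str.len v ≤ PySem.Str.len m0
    · simp only [pvStep, hl, if_true] at h
      by_cases hf : fits m0 v = true
      · rw [if_pos hf] at h
        obtain ⟨hmem, hall⟩ := ih m0 m h
        refine ⟨?_, ?_⟩
        · rcases List.mem_cons.mp hmem with h1 | h1 <;> simp [h1]
        · intro x hx
          rcases List.mem_cons.mp hx with rfl | hx
          · exact hall x (List.mem_cons_self)
          · rcases List.mem_cons.mp hx with rfl | hx
            · exact htrans x m0 m hf (hall m0 List.mem_cons_self)
            · exact hall x (List.mem_cons_of_mem _ hx)
      · rw [if_neg hf, pvFold_none] at h; exact absurd h (by simp)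
    · simp only [pvStep, hl, if_false] at h
      by_cases hf : fits v m0 = true
      · rw [if_pos hf] at h
        obtain ⟨hmem, hall⟩ := ih v m h
        refine ⟨?_, ?_⟩
        · rcases List.mem_cons.mp hmem with h1 | h1 <;> simp [h1]
        · intro x hx
          rcases List.mem_cons.mp hx with rfl | hx
          · exact htrans x v m hf (hall v List.mem_cons_self)
          · rcases List.mem_cons.mp hx with rfl | hx
            · exact hall x List.mem_cons_self
            · exact hall x (List.mem_cons_of_mem _ hx)
      · rw [if_neg hf, pvFold_none] at h; exact absurd h (by simp)

theorem pvFold_succeeds (fits : String → String → Bool) (a : String)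
    (hcmp : ∀ x y, fits a x = true → fits a y = true →
      PySem.Str.len x ≤ PySem.Str.len y → fits y x = true) :
    ∀ (rest : List String) (m0 : String), fits a m0 = true →
      (∀ x ∈ rest, fits a x = true) →
      ∃ m, rest.foldl (pvStep fits) (some m0) = some m := by
  intro rest
  induction rest with
  | nil => intro m0 _ _; exact ⟨m0, rfl⟩
  | cons v t ih =>
    intro m0 h0 hall
    have hv : fits a v = true := hall v (by simp)
    simp only [List.foldl_cons]
    by_cases hl : PySem.Str.len v ≤ PySem.Str.len m0
    · have hf : fits m0 v = true := hcmp v m0 hv h0 hl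
      simp only [pvStep, hl, if_true, hf]
      exact ih m0 h0 (fun x hx => hall x (by simp [hx]))
    · have hl' : PySem.Str.len m0 ≤ PySem.Str.len v := le_of_not_ge hl
      have hf : fits v m0 = true := hcmp m0 v h0 hv hl'
      simp only [pvStep, hl, if_false, hf]
      exact ih v hv (fun x hx => hall x (by simp [hx]))

/-- The merge fold, characterised: with `a` a member of maximal length, it returns `some a`
    iff everything fits `a`, else `none`. -/
theorem pvMerge_char (fits : String → String → Bool)
    (hrefl : ∀ x, fits x x = true)
    (htrans : ∀ x y z, fits y x = true → fits z y = true → fits z x = true)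
    (hlen : ∀ x y, fits y x = true → PySem.Str.len x ≤ PySem.Str.len y)
    (hasym : ∀ x y, fits y x = true → PySem.Str.len y ≤ PySem.Str.len x → x = y)
    (hcmpz : ∀ x y z, fits z x = true → fits z y = true →
      PySem.Str.len x ≤ PySem.Str.len y → fits y x = true)
    (vs : List String) (a : String) (ha : a ∈ vs)
    (hmax : ∀ x ∈ vs, PySem.Str.len x ≤ PySem.Str.len a) :
    merge_alt vs fits = if (∀ x ∈ vs, fits a x = true) then some a else none := by
  obtain ⟨m0, rest, rfl⟩ : ∃ m0 rest, vs = m0 :: rest := by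
    cases vs with
    | nil => exact absurd ha (by simp)
    | cons m0 rest => exact ⟨m0, rest, rfl⟩
  rw [merge_alt_eq]
  simp only [List.tail_cons, List.headD_cons]
  split_ifs with h
  · obtain ⟨m, hm⟩ := pvFold_succeeds fits a (fun x y => hcmpz x y a) rest m0
      (h m0 (by simp)) (fun x hx => h x (by simp [hx]))
    obtain ⟨hmem, hall⟩ := pvFold_some fits hrefl htrans rest m0 m hm
    have hma : fits m a = true := hall a ha
    have h1 : PySem.Str.len a ≤ PySem.Str.len m := hlen a m hma
    have h2 : PySem.Str.len m ≤ PySem.Str.len a := hmax m hmem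
    rw [hm, hasym a m hma (le_antisymm h2 h1 ▸ le_refl _)]
  · cases heq : rest.foldl (pvStep fits) (some m0) with
    | none => rfl
    | some m =>
      obtain ⟨hmem, hall⟩ := pvFold_some fits hrefl htrans rest m0 m heq
      exact absurd (fun x hx => hcmpz x a m (hall x hx) (hall a ha) (hmax x hx)) h

-- The two fits relations, read as list-prefix / list-suffix.
theorem pvStartswith_iff (l s : String) :
    PySem.Str.startswith l s = true ↔ s.toList <+: l.toList := by
  rw [PySem.Str.startswith_eq]; exact PySem.Chars.startswith_iff _ _

theorem pvEndswith_iff (l s : String) :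
    PySem.Str.endswith l s = true ↔ s.toList <:+ l.toList := by
  rw [PySem.Str.endswith_eq]; exact PySem.Chars.endswith_iff _ _

theorem pvLen_le_iff (x y : String) :
    PySem.Str.len x ≤ PySem.Str.len y ↔ x.toList.length ≤ y.toList.length := by
  simp [PySem.Str.len_eq]

-- A's slice tests, identified with startswith / endswith.
theorem pvCheckPref (p a : String) :
    (p == PySem.Str.slice a none (some (PySem.Str.len p))) = PySem.Str.startswith a p := by
  rw [Bool.eq_iff_iff, beq_iff_eq, pvStartswith_iff]
  rw [show (p = PySem.Str.slice a none (some (PySem.Str.len p))) ↔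
      (p.toList = (PySem.Str.slice a none (some (PySem.Str.len p))).toList) from
      ⟨fun h => h ▸ rfl, String.toList_inj.mp⟩]
  rw [PySem.Str.toList_slice, PySem.Chars.slice_eq_listSlice, PySem.Str.len_eq,
    PySem.List.slice_to _ (by positivity)]
  simp only [Int.toNat_natCast]
  exact (List.prefix_iff_eq_take).symm

theorem pvCheckSuf (s b : String) :
    (s == PySem.Str.slice b (some (PySem.Str.len b - PySem.Str.len s)) none) =
      PySem.Str.endswith b s := by
  rw [Bool.eq_iff_iff, beq_iff_eq, pvEndswith_iff]
  rw [show (s = PySem.Str.slice b (some (PySem.Str.len b - PySem.Str.len s)) none) ↔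
      (s.toList = (PySem.Str.slice b (some (PySem.Str.len b - PySem.Str.len s)) none).toList) from
      ⟨fun h => h ▸ rfl, String.toList_inj.mp⟩]
  rw [PySem.Str.toList_slice, PySem.Chars.slice_eq_listSlice]
  by_cases hl : s.toList.length ≤ b.toList.length
  · rw [show PySem.Str.len b - PySem.Str.len s = ((b.toList.length - s.toList.length : Nat) : Int) by
      simp only [PySem.Str.len_eq]; omega]
    rw [PySem.List.slice_from_natCast]
    exact (List.suffix_iff_eq_drop).symm
  · constructor
    · intro h
      have hlen := congrArg List.length h
      rw [PySem.List.slice_some_none, List.length_drop] at hlen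
      omega
    · intro h
      have := h.length_le
      omega

-- The last element of the length-sorted list is a member of maximal length.
theorem pvSortedLast (l : List String) (hne : l ≠ []) :
    PySem.List.pyGetD (PySem.List.sorted l (fun s => PySem.Str.len s)) (-1) "" ∈ l ∧
      ∀ x ∈ l, PySem.Str.len x ≤
        PySem.Str.len (PySem.List.pyGetD (PySem.List.sorted l (fun s => PySem.Str.len s)) (-1) "") := by
  have hsne : PySem.List.sorted l (fun s => PySem.Str.len s) ≠ [] := by
    simpa [PySem.List.sorted_eq_nil_iff] using hne
  rw [PySem.List.pyGetD_neg_one _ _ hsne]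
  constructor
  · exact (PySem.List.mem_sorted _ _ _ _).mp (List.getLast_mem hsne)
  · intro x hx
    obtain ⟨i, hi, hix⟩ := List.mem_iff_getElem.mp ((PySem.List.mem_sorted l (fun s => PySem.Str.len s) false x).mpr hx)
    rw [List.getLast_eq_getElem, ← hix]
    exact PySem.List.key_sorted_getElem_mono l (fun s => PySem.Str.len s) (by omega) (by omega)

-- all over the sorted list = the same universally quantified test over the original list.
theorem pvAllSorted (l : List String) (f : String → Bool) :
    ((PySem.List.sorted l (fun s => PySem.Str.len s)).all f = true) ↔ ∀ x ∈ l, f x = true := by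
  simp [List.all_eq_true, PySem.List.mem_sorted]

-- A's triple fold, reduced to three maps.
theorem pvTripleFold (P : List String) :
    P.foldl (fun (st : List String × List String × List String) pattern =>
      let parts := (PySem.Str.split? pattern "*").getD []
      let pfx := PySem.List.pyGetD parts 0 ""
      let sfx := PySem.List.pyGetD parts (-1) ""
      let mid := PySem.Str.join "" (PySem.List.slice parts (some 1) (some ((parts.length : Int) - 1)))
      (st.1 ++ [pfx], st.2.1 ++ [sfx], st.2.2 ++ [mid])) ([], [], []) =
      (P.map pvPfx, P.map pvSfx, P.map pvMidA) := by
  have h : (fun (st : List String × List String × List String) pattern =>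
      let parts := (PySem.Str.split? pattern "*").getD []
      let pfx := PySem.List.pyGetD parts 0 ""
      let sfx := PySem.List.pyGetD parts (-1) ""
      let mid := PySem.Str.join "" (PySem.List.slice parts (some 1) (some ((parts.length : Int) - 1)))
      (st.1 ++ [pfx], st.2.1 ++ [sfx], st.2.2 ++ [mid])) =
      (fun (st : List String × List String × List String) pattern =>
        (st.1 ++ [pvPfx pattern], st.2.1 ++ [pvSfx pattern], st.2.2 ++ [pvMidA pattern])) := rfl
  rw [h]
  rw [PySem.List.foldl_prod_mk (f := fun (s1 : List String) pattern => s1 ++ [pvPfx pattern])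
    (g := fun (s2 : List String × List String) pattern => (s2.1 ++ [pvSfx pattern], s2.2 ++ [pvMidA pattern]))]
  rw [PySem.List.foldl_prod_mk (f := fun (s1 : List String) pattern => s1 ++ [pvSfx pattern])
    (g := fun (s2 : List String) pattern => s2 ++ [pvMidA pattern])]
  simp only [PySem.List.foldl_append_singleton_eq_map, List.nil_append]

-- ===== VERDICT (by name: the statement is the Claim_ definition above) =====
theorem solution_spec : Claim_equal_solution := by
  intro P _ hpre
  unfold Pre_solution at hpre
  unfold Spec_solution solution solution_alt
  rw [pvTripleFold]
  simp only [List.map_map]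
  have hmapP : P.map ((fun parts => PySem.List.pyGetD parts 0 "") ∘
      (fun p => (PySem.Str.split? p "*").getD [])) = P.map pvPfx := rfl
  have hmapS : P.map ((fun parts => PySem.List.pyGetD parts (-1) "") ∘
      (fun p => (PySem.Str.split? p "*").getD [])) = P.map pvSfx := rfl
  have hmapM : P.map ((fun parts => PySem.Str.join "" (PySem.List.slice parts (some 1) (some (-1)))) ∘
      (fun p => (PySem.Str.split? p "*").getD [])) = P.map pvMidB := rfl
  rw [hmapP, hmapS, hmapM]
  have hpne : P.map pvPfx ≠ [] := by simpa using hpre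
  have hsne : P.map pvSfx ≠ [] := by simpa using hpre
  obtain ⟨haP, hmaxP⟩ := pvSortedLast (P.map pvPfx) hpne
  obtain ⟨haS, hmaxS⟩ := pvSortedLast (P.map pvSfx) hsne
  set a := PySem.List.pyGetD (PySem.List.sorted (P.map pvPfx) (fun s => PySem.Str.len s)) (-1) "" with ha
  set b := PySem.List.pyGetD (PySem.List.sorted (P.map pvSfx) (fun s => PySem.Str.len s)) (-1) "" with hb
  rw [pvMerge_char PySem.Str.startswith
      (fun x => (pvStartswith_iff x x).mpr List.prefix_rfl)
      (fun x y z h1 h2 => (pvStartswith_iff z x).mpr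
        (((pvStartswith_iff y x).mp h1).trans ((pvStartswith_iff z y).mp h2)))
      (fun x y h => (pvLen_le_iff x y).mpr ((pvStartswith_iff y x).mp h).length_le)
      (fun x y h hle => String.toList_inj.mp (((pvStartswith_iff y x).mp h).eq_of_length
        (le_antisymm ((pvStartswith_iff y x).mp h).length_le ((pvLen_le_iff y x).mp hle))))
      (fun x y z h1 h2 hle => (pvStartswith_iff y x).mpr
        (List.prefix_of_prefix_length_le ((pvStartswith_iff z x).mp h1)
          ((pvStartswith_iff z y).mp h2) ((pvLen_le_iff x y).mp hle)))
      (P.map pvPfx) a haP hmaxP]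
  rw [pvMerge_char PySem.Str.endswith
      (fun x => (pvEndswith_iff x x).mpr List.suffix_rfl)
      (fun x y z h1 h2 => (pvEndswith_iff z x).mpr
        (((pvEndswith_iff y x).mp h1).trans ((pvEndswith_iff z y).mp h2)))
      (fun x y h => (pvLen_le_iff x y).mpr ((pvEndswith_iff y x).mp h).length_le)
      (fun x y h hle => String.toList_inj.mp (((pvEndswith_iff y x).mp h).eq_of_length
        (le_antisymm ((pvEndswith_iff y x).mp h).length_le ((pvLen_le_iff y x).mp hle))))
      (fun x y z h1 h2 hle => (pvEndswith_iff y x).mpr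
        (List.suffix_of_suffix_length_le ((pvEndswith_iff z x).mp h1)
          ((pvEndswith_iff z y).mp h2) ((pvLen_le_iff x y).mp hle)))
      (P.map pvSfx) b haS hmaxS]
  simp only [pvCheckPref, pvCheckSuf]
  by_cases hP : ∀ x ∈ P.map pvPfx, PySem.Str.startswith a x = true
  · rw [if_pos hP, if_pos ((pvAllSorted (P.map pvPfx) (fun pfx => PySem.Str.startswith a pfx)).mpr hP)]
    by_cases hS : ∀ x ∈ P.map pvSfx, PySem.Str.endswith b x = true
    · rw [if_pos hS, if_pos ((pvAllSorted (P.map pvSfx) (fun sfx => PySem.Str.endswith b sfx)).mpr hS)]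
      rw [show pvMidA = pvMidB from funext pvMidA_eq]
    · rw [if_neg hS, if_neg (fun hc => hS ((pvAllSorted (P.map pvSfx)
        (fun sfx => PySem.Str.endswith b sfx)).mp hc))]
  · rw [if_neg hP, if_neg (fun hc => hP ((pvAllSorted (P.map pvPfx)
      (fun pfx => PySem.Str.startswith a pfx)).mp hc))]
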